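-- pv_equiv track=rewrite | github.com/liuzhaobing/nlpauto | apps/nlp/src/mmue/mmue_regex/mmue_regex_test.py | regex_text_handle
-- ===== SOURCE A (Python) =====
-- def regex_text_handle(s):
--     """对regex_text进行切割 排列组合成用例列表 步骤：
--     example：小达[今天|明天|后天|昨天][成都|上海|北京|深圳]天气怎么样
--
--     1.将regex_text按照[]拆分成列表：[小达, 今天|明天|后天|昨天, 成都|上海|北京|深圳, 天气怎么样]
--     2.将列表中含有|分隔线的拆分成列表：[小达, [今天, 明天, 后天, 昨天], [成都, 上海, 北京, 深圳], 天气怎么样]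
--     3.通过递归将用例排列组合：
--     :return: 返回用例列表 list
--     """
--
--     def permutation(new_list):
--         """递归 排列组合用例"""
--         if len(new_list) <= 1:
--             return new_list
--         cc = []
--         for aa in new_list[-2]:
--             for bb in new_list[-1]:
--                 cc.append(aa + bb)
--         new_list.pop()
--         new_list[-1] = cc
--         return permutation(new_list)
--
--     if "[" in s:
--         temp = [i for i in s.replace("[", "kk").replace("]", "kk").split("kk") if i != ""]
--         ss = []
--         for i in temp:
--             if "$" not in i and "^" not in i and "#" not in i:
--                 if "|" in i:
--                     ss.append(i.split("|"))
--                 else: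
--                     ss.append([str(i)])
--         return permutation(ss)
--     return [[s]]
-- ===== SOURCE B (Python) =====
-- def regex_text_handle(s):
--     if "[" in s:
--         temp = [i for i in s.replace("[", "kk").replace("]", "kk").split("kk") if i != ""]
--         ss = []
--         for i in temp:
--             if "$" not in i and "^" not in i and "#" not in i:
--                 if "|" in i:
--                     ss.append(i.split("|"))
--                 else:
--                     ss.append([str(i)])
--         if not ss:
--             return []
--         result = [""]
--         for group in ss:
--             result = [r + g for r in result for g in group]
--         return [result]
--     return [[s]]
-- ===== Notes on version B (the rewrite author's own statement) =====
-- stated objective: simpler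
-- what changed: The recursive permutation helper that repeatedly pops and merges the last two groups is replaced by a single left-to-right accumulator fold (result = [r+g for r in result for g in group]), with the empty/non-empty ss cases handled explicitly.
import Mathlib
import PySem

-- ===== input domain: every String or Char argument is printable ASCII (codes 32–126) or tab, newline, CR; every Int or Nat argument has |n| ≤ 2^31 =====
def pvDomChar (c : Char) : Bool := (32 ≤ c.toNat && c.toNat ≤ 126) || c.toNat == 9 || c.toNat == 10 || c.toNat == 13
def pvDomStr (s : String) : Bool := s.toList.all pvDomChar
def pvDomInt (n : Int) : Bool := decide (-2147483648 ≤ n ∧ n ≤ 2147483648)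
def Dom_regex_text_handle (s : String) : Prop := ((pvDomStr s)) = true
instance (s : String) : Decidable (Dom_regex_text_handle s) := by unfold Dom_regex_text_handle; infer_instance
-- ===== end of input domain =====

-- B replaces A's recursive right-to-left pairwise merge of alternative groups by a single
-- left-to-right accumulator fold over the groups (objective: simpler); same parsing, same results.

-- ===== PORT A =====
-- A's recursive helper `permutation`: merges the last two groups until at most one remains.
def pvPermutation (l : List (List String)) : List (List String) :=
  if _h : l.length ≤ 1 then l
  else
    let aa := (PySem.List.pyGet? l (-2)).getD []
    let bb := (PySem.List.pyGet? l (-1)).getD []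
    let cc := aa.flatMap (fun a => bb.map (fun b => a ++ b))
    pvPermutation (l.dropLast.dropLast ++ [cc])
termination_by l.length
decreasing_by simp; omega

def regex_text_handle (s : String) : List (List String) :=
  if PySem.Str.isIn "[" s then
    let temp := ((PySem.Str.split? (PySem.Str.replace (PySem.Str.replace s "[" "kk") "]" "kk") "kk").getD []).filter (fun i => !(i == ""))
    let ss := temp.foldl (fun ss i =>
      if !(PySem.Str.isIn "$" i) && !(PySem.Str.isIn "^" i) && !(PySem.Str.isIn "#" i) then
        if PySem.Str.isIn "|" i then ss ++ [(PySem.Str.split? i "|").getD []]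
        else ss ++ [[i]]
      else ss) []
    pvPermutation ss
  else [[s]]

-- ===== PORT B =====
def regex_text_handle_alt (s : String) : List (List String) :=
  if PySem.Str.isIn "[" s then
    let temp := ((PySem.Str.split? (PySem.Str.replace (PySem.Str.replace s "[" "kk") "]" "kk") "kk").getD []).filter (fun i => !(i == ""))
    let ss := temp.foldl (fun ss i =>
      if !(PySem.Str.isIn "$" i) && !(PySem.Str.isIn "^" i) && !(PySem.Str.isIn "#" i) then
        if PySem.Str.isIn "|" i then ss ++ [(PySem.Str.split? i "|").getD []]
        else ss ++ [[i]]
      else ss) []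
    if ss = [] then []
    else [ss.foldl (fun result group => result.flatMap (fun r => group.map (fun g => r ++ g))) [""]]
  else [[s]]

-- ===== PRECONDITION & SPEC =====
def Spec_regex_text_handle (s : String) (out : List (List String)) : Prop := out = regex_text_handle_alt s
instance (s : String) (out : List (List String)) : Decidable (Spec_regex_text_handle s out) := by unfold Spec_regex_text_handle; infer_instance

-- ===== CLAIM (what is proved, stated in full; the proofs are below) =====
def Claim_equal_regex_text_handle : Prop := ∀ (s : String), Dom_regex_text_handle s → Spec_regex_text_handle s (regex_text_handle s)

-- ===== LEMMAS AND PROOFS =====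
-- the merge of two groups, as a function (proof vocabulary only)
def pvMerge (g p : List String) : List String := g.flatMap (fun a => p.map (fun b => a ++ b))

lemma pvMerge_base (g : List String) : pvMerge g [""] = g := by
  simp [pvMerge]

lemma pvPermutation_eq_foldr (l : List (List String)) (h : l ≠ []) :
    pvPermutation l = [l.foldr pvMerge [""]] := by
  induction l using pvPermutation.induct with
  | case1 l hle =>
    match l, h with
    | [g], _ => rw [pvPermutation]; simp [pvMerge_base]
  | case2 l hle aa bb cc ih =>
    rw [pvPermutation]
    simp only [hle, dite_false]
    rw [ih (by simp)]
    congr 1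
    -- decompose l = xs ++ [a, b]
    obtain ⟨b, t, hrev⟩ := List.exists_cons_of_ne_nil (l := l.reverse)
      (by simp; rintro rfl; simp at hle)
    obtain ⟨a, u, hrev2⟩ := List.exists_cons_of_ne_nil (l := t)
      (by rintro rfl; apply hle; have := congrArg List.length hrev; simp at this; omega)
    have hl : l = u.reverse ++ [a, b] := by
      have := congrArg List.reverse hrev
      simp [hrev2] at this
      simpa using this
    subst hl
    have haa : aa = a := by simp [aa, PySem.List.pyGet?, PySem.List.pyIdx?]
    have hbb : bb = b := by simp [bb, PySem.List.pyGet?, PySem.List.pyIdx?]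
    have hdrop : (u.reverse ++ [a, b]).dropLast.dropLast = u.reverse := by
      rw [show u.reverse ++ [a, b] = (u.reverse ++ [a]) ++ [b] by simp]
      rw [List.dropLast_concat, List.dropLast_concat]
    rw [hdrop, List.foldr_append, List.foldr_append]
    simp only [List.foldr_cons, List.foldr_nil]
    congr 1
    rw [show cc = pvMerge a b by simp [cc, haa, hbb, pvMerge]]
    rw [pvMerge_base, show pvMerge a (pvMerge b [""]) = pvMerge a b by rw [pvMerge_base]]

lemma pvFoldl_eq_flatMap_foldr (l : List (List String)) (acc : List String) :
    l.foldl (fun result group => result.flatMap (fun r => group.map (fun g => r ++ g))) acc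
      = acc.flatMap (fun r => (l.foldr pvMerge [""]).map (fun b => r ++ b)) := by
  induction l generalizing acc with
  | nil => simp
  | cons g t ih =>
    simp only [List.foldl_cons, List.foldr_cons]
    rw [ih]
    simp [pvMerge, List.flatMap_assoc, List.map_flatMap, List.flatMap_map,
      Function.comp_def, String.append_assoc]

lemma pvCore (ss : List (List String)) :
    pvPermutation ss
      = if ss = [] then []
        else [ss.foldl (fun result group => result.flatMap (fun r => group.map (fun g => r ++ g))) [""]] := by
  by_cases hss : ss = []
  · subst hss; rw [pvPermutation]; simp
  · rw [pvPermutation_eq_foldr ss hss, if_neg hss, pvFoldl_eq_flatMap_foldr]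
    simp

-- ===== VERDICT (by name: the statement is the Claim_ definition above) =====
theorem regex_text_handle_spec : Claim_equal_regex_text_handle := by
  intro s _
  unfold Spec_regex_text_handle regex_text_handle regex_text_handle_alt
  split
  · exact pvCore _
  · rfl
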